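-- pv_equiv track=rewrite | github.com/MarciovsRocha/maratona_programacao_2022 | solucoes/python/problema1.py | separar_instancias
-- ===== SOURCE A (Python) =====
-- def separar_instancias(lines: list):
--     index = 0
--     instancias = []
--     while index < len(lines):
--         n_registers = int(lines[index].replace('\n',''))
--         index+=+1 # avança 1 linha
--         instancias.append(lines[(index):(index+n_registers)])
--         index = index+n_registers+1
--     return instancias
-- ===== SOURCE B (Python) =====
-- def separar_instancias(lines: list):
--     instancias = []
--     it = iter(lines)
--     for line in it:
--         n = int(line.replace('\n', ''))
--         instancias.append([x for _, x in zip(range(n), it)])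
--         next(it, None)  # consume the separator line between instance groups
--     return instancias
-- ===== Notes on version B (the rewrite author's own statement) =====
-- stated objective: idiomatic
-- what changed: Replaces A's explicit index arithmetic over the whole list (while-loop with manual index updates and slicing) by single-pass stateful iterator consumption (for line in it, zip(range(n), it), next(it, None)).
-- outside the precondition, e.g. on separar_instancias(['-1', '0']): A returns [[], []], B returns [[]]; on separar_instancias(['-2']): A does not finish within the time limit, B returns [[]]
import Mathlib
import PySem

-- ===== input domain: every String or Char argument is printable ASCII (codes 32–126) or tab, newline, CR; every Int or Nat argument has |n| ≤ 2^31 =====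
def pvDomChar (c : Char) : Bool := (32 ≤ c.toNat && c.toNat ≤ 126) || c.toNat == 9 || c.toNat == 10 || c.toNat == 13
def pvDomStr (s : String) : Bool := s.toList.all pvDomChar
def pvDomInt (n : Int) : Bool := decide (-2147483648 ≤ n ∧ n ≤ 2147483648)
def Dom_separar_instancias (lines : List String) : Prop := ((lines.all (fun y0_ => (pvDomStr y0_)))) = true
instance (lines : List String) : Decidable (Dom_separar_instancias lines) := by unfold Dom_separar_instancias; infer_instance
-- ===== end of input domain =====

-- B replaces A's while-loop with explicit index arithmetic and slicing by a single
-- stateful iterator pass; equivalence is proved on inputs whose count lines all parse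
-- as nonnegative ints (Pre_), where A returns normally.

-- ===== PORT A =====
-- A's while-loop: fuel = one unit per iteration (within Pre_ each iteration consumes
-- ≥ 2 lines, so lines.length + 1 units suffice); fuel-exhaustion / raise branches
-- return the accumulator only to make the function total.
def separarLoopA (lines : List String) : Nat → Int → List (List String) → List (List String)
  | 0, _, acc => acc
  | fuel + 1, index, acc =>
    if index < PySem.List.len lines then
      match PySem.List.pyGet? lines index with
      | none => acc  -- unreachable: 0 ≤ index < len inside Pre_
      | some line =>
        match PySem.Int.ofStr? (PySem.Str.replace line "\n" "") with
        | none => acc  -- int() raises ValueError: excluded by Pre_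
        | some n =>
          -- index += 1; append lines[index : index+n]; index = index + n + 1
          separarLoopA lines fuel (index + n + 2)
            (acc ++ [PySem.List.slice lines (some (index + 1)) (some (index + 1 + n))])
    else acc

def separar_instancias (lines : List String) : List (List String) :=
  separarLoopA lines (lines.length + 1) 0 []

-- ===== PORT B =====
-- B's iterator: the remaining iterator is the suffix `rest`; `zip(range(n), it)` takes
-- min(n, remaining) elements, `next(it, None)` drops one more.
set_option maxHeartbeats 1000000 in
def separarLoopB : List String → List (List String) → List (List String)
  | [], acc => acc
  | line :: it, acc =>
    match PySem.Int.ofStr? (PySem.Str.replace line "\n" "") with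
    | none => acc  -- int() raises ValueError: excluded by Pre_
    | some n => separarLoopB (it.drop (n.toNat + 1)) (acc ++ [it.take n.toNat])
termination_by rest => rest.length
decreasing_by
  simp only [List.length_drop, List.length_cons]; omega

def separar_instancias_alt (lines : List String) : List (List String) :=
  separarLoopB lines []

-- ===== PRECONDITION & SPEC =====
-- Pre_ excludes inputs on which some count line fails to parse as an int (A raises
-- ValueError) or parses negative (A then loops forever or returns a group layout from
-- negative-slice arithmetic that is an accident of its index bookkeeping, e.g.
-- ['-1','0']); it is a shape check on the input (each count line parses nonnegative),
-- recursive on the group structure, and computes no output.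
def preChk : List String → Nat → Bool
  | [], _ => true
  | _ :: rest, skip + 1 => preChk rest skip
  | line :: rest, 0 =>
    match PySem.Int.ofStr? (PySem.Str.replace line "\n" "") with
    | none => false
    | some n => decide (0 ≤ n) && preChk rest (n.toNat + 1)

def Pre_separar_instancias (lines : List String) : Prop := preChk lines 0 = true
instance (lines : List String) : Decidable (Pre_separar_instancias lines) := by
  unfold Pre_separar_instancias; infer_instance

def pvWitness_separar_instancias : List String := ["2", "a", "b", "", "1", "c"]

def Spec_separar_instancias (lines : List String) (out : List (List String)) : Prop := out = separar_instancias_alt lines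
instance (lines : List String) (out : List (List String)) : Decidable (Spec_separar_instancias lines out) := by unfold Spec_separar_instancias; infer_instance

-- ===== CLAIM (what is proved, stated in full; the proofs are below) =====
def Claim_equal_separar_instancias : Prop := ∀ (lines : List String), Dom_separar_instancias lines → Pre_separar_instancias lines → Spec_separar_instancias lines (separar_instancias lines)

-- ===== LEMMAS AND PROOFS =====

-- A skip counter k over the suffix is the same check as starting at the suffix k later.
lemma preChk_skip : ∀ (l : List String) (k : Nat), preChk l k = preChk (l.drop k) 0 := by
  intro l
  induction l with
  | nil => intro k; cases k <;> rfl
  | cons x xs ih =>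
    intro k
    cases k with
    | zero => rfl
    | succ k => simpa [preChk] using ih k

-- Main loop correspondence: if the remaining iterator is the suffix of `lines` at
-- `index`, the fuelled index loop of A computes exactly B's iterator loop.
set_option maxHeartbeats 2000000 in
lemma separarLoop_eq (fuel : Nat) :
    ∀ (lines : List String) (index : Int) (rest : List String) (acc : List (List String)),
      0 ≤ index → rest = lines.drop index.toNat → rest.length < fuel →
      preChk rest 0 = true →
      separarLoopA lines fuel index acc = separarLoopB rest acc := by
  induction fuel with
  | zero => intro _ _ _ _ _ _ h _; omega
  | succ fuel ih =>
    intro lines index rest acc hidx hrest hfuel hpre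
    cases hr : rest with
    | nil =>
      subst hr
      have hlen : lines.length ≤ index.toNat := by
        have := List.drop_eq_nil_iff.mp hrest.symm
        omega
      simp only [separarLoopA, PySem.List.len]
      rw [if_neg (by omega)]
      simp [separarLoopB]
    | cons line it =>
      subst hrest
      have hlt : index.toNat < lines.length := by
        by_contra h
        rw [List.drop_eq_nil_iff.mpr (by omega)] at hr
        simp at hr
      have hget : PySem.List.pyGet? lines index = some line := by
        rw [PySem.List.pyGet?_of_nonneg lines hidx]
        have : (lines.drop index.toNat)[0]? = some line := by rw [hr]; rfl
        simpa [List.getElem?_drop] using this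
      rw [hr] at hpre
      simp only [preChk] at hpre
      cases hparse : PySem.Int.ofStr? (PySem.Str.replace line "\n" "") with
      | none => rw [hparse] at hpre; simp at hpre
      | some n =>
        rw [hparse] at hpre
        simp only [Bool.and_eq_true, decide_eq_true_eq] at hpre
        obtain ⟨hn, hpre'⟩ := hpre
        rw [preChk_skip] at hpre'
        simp only [separarLoopA, separarLoopB, PySem.List.len, hget, hparse]
        rw [if_pos (by omega : index < (lines.length : Int))]
        have hslice : PySem.List.slice lines (some (index + 1)) (some (index + 1 + n))
            = it.take n.toNat := by
          rw [PySem.List.slice_toNat lines (by omega) (by omega)]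
          have hdrop : lines.drop (index + 1).toNat = it := by
            have : lines.drop index.toNat = line :: it := hr
            have h2 : (lines.drop index.toNat).drop 1 = it := by rw [this]; rfl
            rw [List.drop_drop] at h2
            rw [show (index + 1).toNat = index.toNat + 1 by omega]
            exact h2
          rw [hdrop]
          congr 1
          omega
        rw [hslice]
        apply ih lines (index + n + 2) (it.drop (n.toNat + 1)) _ (by omega)
        · have hdrop : lines.drop (index.toNat + 1) = it := by
            have h2 : (lines.drop index.toNat).drop 1 = it := by rw [hr]; rfl
            rw [List.drop_drop] at h2; exact h2
          have hsplit : lines.drop ((index + n + 2).toNat)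
              = (lines.drop (index.toNat + 1)).drop (n.toNat + 1) := by
            rw [List.drop_drop]; congr 1; omega
          rw [hsplit, hdrop]
        · have h1 : (line :: it).length < fuel + 1 := by rw [← hr]; exact hfuel
          have h2 : (it.drop (n.toNat + 1)).length ≤ it.length := by
            simp [List.length_drop]
          simp only [List.length_cons] at h1
          omega
        · exact hpre'

-- ===== VERDICT (by name: the statement is the Claim_ definition above) =====
theorem separar_instancias_spec : Claim_equal_separar_instancias := by
  intro lines _ hpre
  unfold Spec_separar_instancias separar_instancias separar_instancias_alt
  exact separarLoop_eq (lines.length + 1) lines 0 lines [] le_rfl (by simp) (by omega) hpre
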